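-- pv_equiv track=rewrite | github.com/alantao5056/USACO_Silver | 2017/February/1_helpcross/helpcross.py | getAvaliableCows
-- ===== SOURCE A (Python) =====
-- def getAvaliableCows(cows, c):
--   minEnd = float("inf")
--   maxIndex = -1
--
--   start = False
--
--   for i in range(0, len(cows)):
--     if cows[i][0] <= c and cows[i][1] >= c:
--       if not start:
--         start = True
--       # avaliable cow
--       if cows[i][1] < minEnd:
--         maxIndex = i
--         minEnd = cows[i][1]
--     else:
--       if start:
--         break
--   return maxIndex
-- ===== SOURCE B (Python) =====
-- def getAvaliableCows(cows, c):
--     n = len(cows)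
--     # Phase 1: locate first matching cow
--     s = 0
--     while s < n and not (cows[s][0] <= c <= cows[s][1]):
--         s += 1
--     if s == n:
--         return -1
--     # Phase 2: delimit the contiguous matching block [s, e)
--     e = s + 1
--     while e < n and cows[e][0] <= c <= cows[e][1]:
--         e += 1
--     # Phase 3: first index in the block with minimal end
--     best = s
--     for i in range(s + 1, e):
--         if cows[i][1] < cows[best][1]:
--             best = i
--     return best
-- ===== Notes on version B (the rewrite author's own statement) =====
-- stated objective: alternative
-- what changed: Replaced A's single flag-and-break loop with a running minimum by a three-phase decomposition: locate the first matching index, delimit the contiguous matching block with a second pointer, then take the first argmin of end times over that block.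
import Mathlib
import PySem

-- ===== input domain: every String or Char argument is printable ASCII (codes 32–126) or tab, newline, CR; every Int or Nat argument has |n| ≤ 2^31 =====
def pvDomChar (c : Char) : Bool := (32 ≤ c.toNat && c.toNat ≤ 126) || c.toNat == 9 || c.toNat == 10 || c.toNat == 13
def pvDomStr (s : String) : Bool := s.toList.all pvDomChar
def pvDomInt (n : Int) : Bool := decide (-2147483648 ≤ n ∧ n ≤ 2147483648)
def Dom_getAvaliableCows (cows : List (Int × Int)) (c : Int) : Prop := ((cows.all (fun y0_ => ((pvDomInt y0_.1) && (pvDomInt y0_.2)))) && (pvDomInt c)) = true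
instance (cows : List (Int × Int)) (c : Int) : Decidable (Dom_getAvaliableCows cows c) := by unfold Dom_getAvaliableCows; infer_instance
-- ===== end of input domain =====

-- B replaces A's single flag-and-break running-minimum loop by a three-phase
-- decomposition (locate first match, delimit contiguous block, argmin over block);
-- same O(n) cost, objective: alternative structure.

-- ===== PORT A =====
-- A's `for i in range(0, len(cows))` with `break`, ported as structural recursion on
-- the number of remaining iterations (fuel = len - i, so the loop runs exactly
-- len(cows) times unless it breaks); minEnd = none models float("inf").
def getAvaliableCowsGo (cows : List (Int × Int)) (c : Int) :
    Nat → Nat → Option Int → Int → Bool → Int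
  | 0, _, _, maxIndex, _ => maxIndex
  | fuel + 1, i, minEnd, maxIndex, start =>
    let cw := cows.getD i (0, 0)
    if cw.1 ≤ c ∧ cw.2 ≥ c then
      -- (start := true on this branch, whether or not it was set before)
      if (match minEnd with | none => true | some m => decide (cw.2 < m)) = true then
        getAvaliableCowsGo cows c fuel (i + 1) (some cw.2) (Int.ofNat i) true
      else
        getAvaliableCowsGo cows c fuel (i + 1) minEnd maxIndex true
    else
      if start then maxIndex
      else getAvaliableCowsGo cows c fuel (i + 1) minEnd maxIndex start

def getAvaliableCows (cows : List (Int × Int)) (c : Int) : Int :=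
  getAvaliableCowsGo cows c cows.length 0 none (-1) false

-- ===== PORT B =====
-- Phase 1: first index s with cows[s][0] <= c <= cows[s][1] (returns length if none);
-- the while-loop runs structurally on fuel (len iterations suffice).
def altFindStart (cows : List (Int × Int)) (c : Int) : Nat → Nat → Nat
  | 0, s => s
  | fuel + 1, s =>
    if s < cows.length then
      let cw := cows.getD s (0, 0)
      if cw.1 ≤ c ∧ c ≤ cw.2 then s else altFindStart cows c fuel (s + 1)
    else s

-- Phase 2: advance e while cows[e] still contains c.
def altFindEnd (cows : List (Int × Int)) (c : Int) : Nat → Nat → Nat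
  | 0, e => e
  | fuel + 1, e =>
    if e < cows.length then
      let cw := cows.getD e (0, 0)
      if cw.1 ≤ c ∧ c ≤ cw.2 then altFindEnd cows c fuel (e + 1) else e
    else e

-- Phase 3: first index in the block whose end is minimal (fuel = number of
-- remaining candidates, i = next candidate, best = current argmin).
def altArgmin (cows : List (Int × Int)) : Nat → Nat → Nat → Nat
  | 0, _, best => best
  | fuel + 1, i, best =>
    if (cows.getD i (0, 0)).2 < (cows.getD best (0, 0)).2 then
      altArgmin cows fuel (i + 1) i
    else
      altArgmin cows fuel (i + 1) best

def getAvaliableCows_alt (cows : List (Int × Int)) (c : Int) : Int :=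
  let s := altFindStart cows c cows.length 0
  if s = cows.length then -1
  else
    let e := altFindEnd cows c cows.length s
    Int.ofNat (altArgmin cows (e - (s + 1)) (s + 1) s)

-- ===== PRECONDITION & SPEC =====
def Spec_getAvaliableCows (cows : List (Int × Int)) (c : Int) (out : Int) : Prop := out = getAvaliableCows_alt cows c
instance (cows : List (Int × Int)) (c : Int) (out : Int) : Decidable (Spec_getAvaliableCows cows c out) := by unfold Spec_getAvaliableCows; infer_instance

-- ===== CLAIM (what is proved, stated in full; the proofs are below) =====
def Claim_equal_getAvaliableCows : Prop := ∀ (cows : List (Int × Int)) (c : Int), Dom_getAvaliableCows cows c → Spec_getAvaliableCows cows c (getAvaliableCows cows c)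

-- ===== LEMMAS AND PROOFS =====

-- "cow i contains c"
def CowM (cows : List (Int × Int)) (c : Int) (i : Nat) : Prop :=
  (cows.getD i (0, 0)).1 ≤ c ∧ c ≤ (cows.getD i (0, 0)).2

lemma altFindEnd_ge (cows : List (Int × Int)) (c : Int) :
    ∀ f e, e ≤ altFindEnd cows c f e := by
  intro f
  induction f with
  | zero => intro e; simp [altFindEnd]
  | succ f ih =>
    intro e
    simp only [altFindEnd]
    split_ifs with h1 h2
    · exact Nat.le_of_succ_le (ih (e + 1))
    · exact le_refl e
    · exact le_refl e

lemma altFindEnd_le (cows : List (Int × Int)) (c : Int) :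
    ∀ f e, e ≤ cows.length → altFindEnd cows c f e ≤ cows.length := by
  intro f
  induction f with
  | zero => intro e he; simpa [altFindEnd] using he
  | succ f ih =>
    intro e he
    simp only [altFindEnd]
    split_ifs with h1 h2
    · exact ih (e + 1) (by omega)
    · exact he
    · exact he

lemma altFindEnd_match (cows : List (Int × Int)) (c : Int) :
    ∀ f e j, e ≤ j → j < altFindEnd cows c f e → CowM cows c j := by
  intro f
  induction f with
  | zero => intro e j h1 h2; simp [altFindEnd] at h2; omega
  | succ f ih =>
    intro e j h1 h2
    simp only [altFindEnd] at h2
    split_ifs at h2 with hl hm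
    · rcases Nat.eq_or_lt_of_le h1 with rfl | hlt
      · exact hm
      · exact ih (e + 1) j hlt h2
    · omega
    · omega

lemma altFindEnd_stop (cows : List (Int × Int)) (c : Int) :
    ∀ f e, cows.length ≤ f + e → altFindEnd cows c f e < cows.length →
      ¬ CowM cows c (altFindEnd cows c f e) := by
  intro f
  induction f with
  | zero => intro e hfe h; simp only [altFindEnd] at h; omega
  | succ f ih =>
    intro e hfe h
    simp only [altFindEnd] at h ⊢
    split_ifs at h ⊢ with hl hm
    · exact ih (e + 1) (by omega) h
    · exact hm
    · omega

-- one-step unfolding of phase 2 at a matching in-range index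
lemma altFindEnd_step (cows : List (Int × Int)) (c : Int) (f e : Nat)
    (hl : e < cows.length) (hm : CowM cows c e) :
    altFindEnd cows c (f + 1) e = altFindEnd cows c f (e + 1) := by
  simp only [altFindEnd]
  rw [if_pos hl]
  exact if_pos hm

-- In-block phase: from index i inside the all-matching block ending at e, A's
-- running-minimum loop computes exactly B's argmin over the remaining candidates.
lemma in_phase (cows : List (Int × Int)) (c : Int) (e : Nat)
    (he : e ≤ cows.length)
    (hstop : e < cows.length → ¬ CowM cows c e) :
    ∀ n i best, i + n = e → (∀ j, i ≤ j → j < e → CowM cows c j) →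
      getAvaliableCowsGo cows c (cows.length - i) i
          (some (cows.getD best (0, 0)).2) (Int.ofNat best) true
        = Int.ofNat (altArgmin cows n i best) := by
  intro n
  induction n with
  | zero =>
    intro i best hie _
    have hieq : i = e := by omega
    subst hieq
    by_cases hlen : i < cows.length
    · obtain ⟨k, hk⟩ : ∃ k, cows.length - i = k + 1 := ⟨cows.length - i - 1, by omega⟩
      rw [hk]
      simp only [getAvaliableCowsGo, altArgmin]
      rw [if_neg (by
        intro hc
        exact hstop hlen ⟨hc.1, hc.2⟩)]
      simp
    · have : cows.length - i = 0 := by omega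
      rw [this]
      simp [getAvaliableCowsGo, altArgmin]
  | succ n ih =>
    intro i best hie hmatch
    have hilt : i < e := by omega
    have hlen : i < cows.length := by omega
    have hm := hmatch i (le_refl i) hilt
    obtain ⟨k, hk⟩ : ∃ k, cows.length - i = k + 1 := ⟨cows.length - i - 1, by omega⟩
    have hk' : cows.length - (i + 1) = k := by omega
    rw [hk]
    simp only [getAvaliableCowsGo, altArgmin]
    rw [if_pos (⟨hm.1, hm.2⟩ : (cows.getD i (0,0)).1 ≤ c ∧ (cows.getD i (0,0)).2 ≥ c)]
    by_cases hlt : (cows.getD i (0, 0)).2 < (cows.getD best (0, 0)).2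
    · rw [if_pos (by simpa using hlt), if_pos hlt, ← hk', ih (i + 1) i (by omega)
        (fun j h1 h2 => hmatch j (by omega) h2)]
    · rw [if_neg (by simpa using hlt), if_neg hlt, ← hk', ih (i + 1) best (by omega)
        (fun j h1 h2 => hmatch j (by omega) h2)]

-- Pre-block phase: while no match has been seen, A's loop from index i equals
-- B run with its phase-1 scan started at i.
lemma pre_phase (cows : List (Int × Int)) (c : Int) :
    ∀ f i, f + i = cows.length →
      getAvaliableCowsGo cows c f i none (-1) false
        = (if altFindStart cows c f i = cows.length then -1
           else Int.ofNat (altArgmin cows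
                  (altFindEnd cows c cows.length (altFindStart cows c f i)
                    - (altFindStart cows c f i + 1))
                  (altFindStart cows c f i + 1) (altFindStart cows c f i))) := by
  intro f
  induction f with
  | zero =>
    intro i hi
    have hieq : i = cows.length := by omega
    simp [getAvaliableCowsGo, altFindStart, hieq]
  | succ f ih =>
    intro i hi
    have hlen : i < cows.length := by omega
    simp only [getAvaliableCowsGo, altFindStart]
    rw [if_pos hlen]
    by_cases hm : (cows.getD i (0, 0)).1 ≤ c ∧ c ≤ (cows.getD i (0, 0)).2
    · rw [if_pos (⟨hm.1, hm.2⟩ : (cows.getD i (0,0)).1 ≤ c ∧ (cows.getD i (0,0)).2 ≥ c),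
          if_pos hm, if_pos trivial, if_neg (by omega : ¬ i = cows.length)]
      -- A continues into the block; B's phase 2/3 start at s = i.
      obtain ⟨g, hg⟩ : ∃ g, cows.length = g + 1 := ⟨cows.length - 1, by omega⟩
      have heq : altFindEnd cows c cows.length i = altFindEnd cows c g (i + 1) := by
        rw [hg]; exact altFindEnd_step cows c g i hlen hm
      have he1 : i + 1 ≤ altFindEnd cows c cows.length i := by
        rw [heq]; exact altFindEnd_ge cows c g (i + 1)
      have hle : altFindEnd cows c cows.length i ≤ cows.length := by
        rw [heq]; exact altFindEnd_le cows c g (i + 1) (by omega)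
      have := in_phase cows c (altFindEnd cows c cows.length i) hle
        (altFindEnd_stop cows c cows.length i (by omega))
        (altFindEnd cows c cows.length i - (i + 1)) (i + 1) i (by omega)
        (fun j hj1 hj2 => altFindEnd_match cows c cows.length i j (by omega) hj2)
      rw [show cows.length - (i + 1) = f from by omega] at this
      exact this
    · rw [if_neg (by
          intro hc
          exact hm ⟨hc.1, hc.2⟩), if_neg hm]
      simp only [Bool.false_eq_true, if_false]
      exact ih (i + 1) (by omega)

-- ===== VERDICT (by name: the statement is the Claim_ definition above) =====
theorem getAvaliableCows_spec : Claim_equal_getAvaliableCows := by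
  intro cows c _
  unfold Spec_getAvaliableCows getAvaliableCows getAvaliableCows_alt
  simpa using pre_phase cows c cows.length 0 (by omega)
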